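-- pv_equiv track=rewrite | github.com/Tomoyon/makehuman1.0.0alpha7 | tools/blender26x/makeclothes/makeclothes.py | stringQuote
-- ===== SOURCE A (Python) =====
-- def stringQuote(string):
--     s = ""
--     for c in string:
--         if c == '\\':
--             s += "\\\\"
--         elif c == '\"':
--             s += "\\\""
--         elif c == '\'':
--             s += "\\\'"
--         else:
--             s += c
--     return s
-- ===== SOURCE B (Python) =====
-- def stringQuote(string):
--     # Escape backslashes first so backslashes added for quotes are not doubled.
--     return string.replace('\\', '\\\\').replace('"', '\\"').replace("'", "\\'")
-- ===== Notes on version B (the rewrite author's own statement) =====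
-- stated objective: idiomatic
-- what changed: Replaced the explicit per-character accumulator loop with three chained str.replace calls (backslash first, then double and single quote).
import Mathlib
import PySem

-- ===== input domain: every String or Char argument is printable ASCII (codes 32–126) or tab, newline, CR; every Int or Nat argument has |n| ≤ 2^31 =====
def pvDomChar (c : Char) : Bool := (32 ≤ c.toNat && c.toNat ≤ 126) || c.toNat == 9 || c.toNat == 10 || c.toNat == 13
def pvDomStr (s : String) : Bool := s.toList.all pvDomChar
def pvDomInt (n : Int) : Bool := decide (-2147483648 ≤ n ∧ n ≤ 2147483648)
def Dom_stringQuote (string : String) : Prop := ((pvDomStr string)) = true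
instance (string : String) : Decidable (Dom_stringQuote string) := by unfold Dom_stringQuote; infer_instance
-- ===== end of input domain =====

-- B replaces A's per-character accumulator loop with three chained str.replace calls
-- (backslash first, then the quotes); objective: more idiomatic, same result.

-- ===== PORT A =====
-- literal transliteration: s = ""; for c in string: append the escape of c; return s
def stringQuote (string : String) : String :=
  String.ofList
    (string.toList.foldl
      (fun s c =>
        if c = '\\' then s ++ ['\\', '\\']
        else if c = '"' then s ++ ['\\', '"']
        else if c = '\'' then s ++ ['\\', '\'']
        else s ++ [c])
      [])

-- ===== PORT B =====
-- literal transliteration of Source B: three chained .replace calls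
def stringQuote_alt (string : String) : String :=
  PySem.Str.replace (PySem.Str.replace (PySem.Str.replace string "\\" "\\\\") "\"" "\\\"") "'" "\\'"

-- ===== PRECONDITION & SPEC =====
def Spec_stringQuote (string : String) (out : String) : Prop := out = stringQuote_alt string
instance (string : String) (out : String) : Decidable (Spec_stringQuote string out) := by unfold Spec_stringQuote; infer_instance

-- ===== CLAIM (what is proved, stated in full; the proofs are below) =====
def Claim_equal_stringQuote : Prop := ∀ (string : String), Dom_stringQuote string → Spec_stringQuote string (stringQuote string)

-- ===== LEMMAS AND PROOFS =====

-- single-character substitution map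
def pvSub (c : Char) (new : List Char) (x : Char) : List Char :=
  if x = c then new else [x]

-- PySem.Chars.replace with a single-character pattern acts pointwise
theorem pvReplace_go_single (c : Char) (new : List Char) :
    ∀ (fuel : Nat) (l acc : List Char), l.length ≤ fuel →
      PySem.Chars.replace.go [c] new fuel l acc = acc.reverse ++ l.flatMap (pvSub c new) := by
  intro fuel
  induction fuel with
  | zero =>
    intro l acc h
    have : l = [] := List.eq_nil_of_length_eq_zero (Nat.le_zero.mp h)
    subst this
    simp [PySem.Chars.replace.go]
  | succ n ih =>
    intro l acc h
    cases l with
    | nil => simp [PySem.Chars.replace.go]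
    | cons x t =>
      by_cases hx : x = c
      · subst hx
        have hp : List.isPrefixOf [x] (x :: t) = true := by
          simp [List.isPrefixOf]
        simp only [PySem.Chars.replace.go, hp, if_pos]
        rw [ih]
        · simp [pvSub]
        · simpa using Nat.le_of_succ_le_succ h
      · have hp : List.isPrefixOf [c] (x :: t) = false := by
          simp [List.isPrefixOf]
          exact fun hh => (hx hh.symm).elim
        simp only [PySem.Chars.replace.go, hp]
        rw [if_neg (by simp)]
        rw [ih]
        · simp [pvSub, hx]
        · simpa using Nat.le_of_succ_le_succ h

theorem pvReplace_single (c : Char) (new s : List Char) :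
    PySem.Chars.replace s [c] new = s.flatMap (pvSub c new) := by
  unfold PySem.Chars.replace
  simp only [List.isEmpty_cons, Bool.false_eq_true, if_false]
  exact pvReplace_go_single c new s.length s [] (le_refl _)

-- the escape of one character, as A computes it
def pvEsc (c : Char) : List Char :=
  if c = '\\' then ['\\', '\\']
  else if c = '"' then ['\\', '"']
  else if c = '\'' then ['\\', '\'']
  else [c]

theorem pvFoldl_esc : ∀ (l acc : List Char),
    l.foldl
      (fun s c =>
        if c = '\\' then s ++ ['\\', '\\']
        else if c = '"' then s ++ ['\\', '"']
        else if c = '\'' then s ++ ['\\', '\'']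
        else s ++ [c]) acc = acc ++ l.flatMap pvEsc := by
  intro l
  induction l with
  | nil => simp
  | cons x t ih =>
    intro acc
    simp only [List.foldl_cons, List.flatMap_cons, ih]
    unfold pvEsc
    split_ifs <;> simp

theorem pvFlatMap_ext {α β : Type} (f g : α → List β) (h : ∀ x, f x = g x) (l : List α) :
    l.flatMap f = l.flatMap g := by
  induction l with
  | nil => rfl
  | cons x t ih => simp [List.flatMap_cons, h, ih]

theorem pvFlatMap_comp {α : Type} (f g : α → List α) (l : List α) :
    (l.flatMap f).flatMap g = l.flatMap (fun x => (f x).flatMap g) := by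
  induction l with
  | nil => rfl
  | cons x t ih => simp [List.flatMap_cons, ih]

theorem pvChain_eq_esc (c : Char) :
    (pvSub '\\' ['\\', '\\'] c).flatMap
      (fun y => (pvSub '"' ['\\', '"'] y).flatMap (pvSub '\'' ['\\', '\''])) = pvEsc c := by
  unfold pvSub pvEsc
  by_cases h1 : c = '\\'
  · subst h1; decide
  · by_cases h2 : c = '"'
    · subst h2; decide
    · by_cases h3 : c = '\''
      · subst h3; decide
      · simp [h1, h2, h3]

theorem pvA_toList (string : String) :
    (stringQuote string).toList = string.toList.flatMap pvEsc := by
  unfold stringQuote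
  rw [String.toList_ofList]
  rw [pvFoldl_esc]
  simp

theorem stringQuote_toList_eq (string : String) :
    (stringQuote string).toList = (stringQuote_alt string).toList := by
  rw [pvA_toList]
  unfold stringQuote_alt
  rw [PySem.Str.toList_replace, PySem.Str.toList_replace, PySem.Str.toList_replace]
  have hb : ("\\" : String).toList = ['\\'] := rfl
  have hbb : ("\\\\" : String).toList = ['\\', '\\'] := rfl
  have hq : ("\"" : String).toList = ['"'] := rfl
  have hbq : ("\\\"" : String).toList = ['\\', '"'] := rfl
  have hs : ("'" : String).toList = ['\''] := rfl
  have hbs : ("\\'" : String).toList = ['\\', '\''] := rfl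
  rw [hb, hbb, hq, hbq, hs, hbs]
  rw [pvReplace_single, pvReplace_single, pvReplace_single]
  rw [pvFlatMap_comp, pvFlatMap_comp]
  exact (pvFlatMap_ext _ _ pvChain_eq_esc string.toList).symm

-- ===== VERDICT (by name: the statement is the Claim_ definition above) =====
theorem stringQuote_spec : Claim_equal_stringQuote := by
  intro string _
  unfold Spec_stringQuote
  have h := stringQuote_toList_eq string
  exact String.toList_inj.mp h
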